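-- pv_equiv track=rewrite | github.com/dhutchison/dhutchison.github.io | scripts/validate_front_matter.py | canonicalise
-- ===== SOURCE A (Python) =====
-- from collections import Counter
--
-- def canonicalise(values: list[str]) -> dict[str, str]:
--     grouped: dict[str, Counter[str]] = {}
--     for value in values:
--         key = value.casefold()
--         grouped.setdefault(key, Counter())[value] += 1
--
--     return {
--         key: counts.most_common(1)[0][0]
--         for key, counts in grouped.items()
--     }
-- ===== SOURCE B (Python) =====
-- def canonicalise(values: list[str]) -> dict[str, str]:
--     out: dict[str, str] = {}
--     remaining = values
--     while remaining:
--         key = remaining[0].casefold()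
--         group = [v for v in remaining if v.casefold() == key]
--         remaining = [v for v in remaining if v.casefold() != key]
--         out[key] = min(dict.fromkeys(group),
--                        key=lambda v: (-group.count(v), group.index(v)))
--     return out
-- ===== Notes on version B (the rewrite author's own statement) =====
-- stated objective: alternative
-- what changed: B builds no frequency table at all: it repeatedly peels off one whole casefold group at a time by partitioning the remaining list with two filters, and picks that group's canonical casing as min over the distinct casings under the composite key (-count, first index), instead of A's single pass that grows per-key Counter dicts and then asks each for most_common(1).
import Mathlib
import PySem

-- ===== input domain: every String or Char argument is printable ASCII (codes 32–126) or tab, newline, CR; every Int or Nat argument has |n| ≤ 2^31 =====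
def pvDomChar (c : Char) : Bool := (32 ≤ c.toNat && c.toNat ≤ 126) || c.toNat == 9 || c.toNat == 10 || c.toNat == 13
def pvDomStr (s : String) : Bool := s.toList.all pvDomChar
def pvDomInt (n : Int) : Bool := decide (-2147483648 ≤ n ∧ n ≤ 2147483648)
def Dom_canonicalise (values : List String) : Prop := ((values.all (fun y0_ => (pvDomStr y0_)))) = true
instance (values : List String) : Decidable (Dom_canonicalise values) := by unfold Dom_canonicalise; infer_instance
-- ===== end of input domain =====

-- B drops A's per-key Counter tables entirely: it peels off one whole casefold group per iteration
-- with two partitioning filters and picks the canonical casing by min over the distinct casings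
-- under the composite key (-count, first index); a different algorithm, not claimed faster.

-- ===== PORT A =====
-- counts.most_common(1)[0][0]: CPython's heapq.nlargest(1, …) is a single max() pass
-- returning the FIRST maximal item in insertion order; [0] raises IndexError on an
-- empty Counter — unreachable here (every counter receives at least one increment),
-- ported with the dead default "".
def pvMostCommon1 (counts : PySem.Dict String Int) : String :=
  match PySem.List.max? counts.items (fun p => p.2) with
  | some p => p.1
  | none => ""

-- loop body: grouped.setdefault(key, Counter())[value] += 1
-- (value.casefold() ported as PySem.Str.lower: exact on the ASCII domain Dom_canonicalise)
def pvStepA (grouped : PySem.Dict String (PySem.Dict String Int)) (value : String) :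
    PySem.Dict String (PySem.Dict String Int) :=
  let key := PySem.Str.lower value
  grouped.insert key ((grouped.getD key PySem.Dict.empty).modify value 0 (· + 1))

def canonicalise (values : List String) : List (String × String) :=
  let grouped := values.foldl pvStepA PySem.Dict.empty
  grouped.items.map (fun p => (p.1, pvMostCommon1 p.2))

-- ===== PORT B =====
-- min(dict.fromkeys(group), key=lambda v: (-group.count(v), group.index(v))): first-minimal
-- element under the lexicographic pair key; min() on an empty sequence raises ValueError —
-- unreachable here (group always contains remaining[0]) — ported with the dead default "";
-- group.index(v) cannot raise (v ∈ group), so its Option is read with the dead default 0.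
def pvWinner (group : List String) : String :=
  match PySem.List.min2? (PySem.List.dedup group)
      (fun v => -(group.count v : Int))
      (fun v => (((PySem.List.index? group v).getD 0 : Nat) : Int)) with
  | some m => m
  | none => ""

-- the while loop: out grows one casefold group per iteration, remaining shrinks
def pvPeel (out : PySem.Dict String String) (remaining : List String) : PySem.Dict String String :=
  match remaining with
  | [] => out
  | v :: vs =>
    pvPeel
      (out.insert (PySem.Str.lower v)
        (pvWinner ((v :: vs).filter (fun w => PySem.Str.lower w == PySem.Str.lower v))))
      ((v :: vs).filter (fun w => PySem.Str.lower w != PySem.Str.lower v))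
termination_by remaining.length
decreasing_by
  have h : (PySem.Str.lower v != PySem.Str.lower v) = false := by simp
  simp only [List.filter_cons, h]
  exact Nat.lt_succ_of_le (List.length_filter_le _ _)

def canonicalise_alt (values : List String) : List (String × String) :=
  (pvPeel PySem.Dict.empty values).items

-- ===== PRECONDITION & SPEC =====
def Spec_canonicalise (values : List String) (out : List (String × String)) : Prop := out = canonicalise_alt values
instance (values : List String) (out : List (String × String)) : Decidable (Spec_canonicalise values out) := by unfold Spec_canonicalise; infer_instance

-- ===== CLAIM (what is proved, stated in full; the proofs are below) =====
def Claim_equal_canonicalise : Prop := ∀ (values : List String), Dom_canonicalise values → Spec_canonicalise values (canonicalise values)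

-- ===== LEMMAS AND PROOFS =====

-- A's per-group selection, abstracted: first count-maximal distinct casing of the group
def pvPickCasing (g : List String) : String :=
  match PySem.List.max? (PySem.List.dedup g) (fun x => (g.count x : Int)) with
  | some m => m
  | none => ""

-- ghost loop relating A's fold to plain per-key occurrence lists
def pvGStep (groups : PySem.Dict String (List String)) (value : String) :
    PySem.Dict String (List String) :=
  groups.modify (PySem.Str.lower value) [] (· ++ [value])

def pvF (p : String × List String) : String × PySem.Dict String Int :=
  (p.1, PySem.Dict.counter p.2)

lemma pv_foldl_max_map {α β κ : Type} [LT κ] [DecidableLT κ] (h : α → β) (key : β → κ) :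
    ∀ (xs : List α) (acc : Option α),
      List.foldl (fun acc x => match acc with
          | none => some x
          | some m => if key m < key x then some x else some m) (acc.map h) (xs.map h)
        = (List.foldl (fun acc x => match acc with
          | none => some x
          | some m => if key (h m) < key (h x) then some x else some m) acc xs).map h := by
  intro xs
  induction xs with
  | nil => intro acc; rfl
  | cons x xs ih =>
    intro acc
    cases acc with
    | none => simpa using ih (some x)
    | some m =>
      by_cases hc : key (h m) < key (h x)
      · simpa [hc] using ih (some x)
      · simpa [hc] using ih (some m)

lemma pv_max?_map {α β κ : Type} [LT κ] [DecidableLT κ] (h : α → β) (key : β → κ) (xs : List α) :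
    PySem.List.max? (xs.map h) key = (PySem.List.max? xs (fun x => key (h x))).map h := by
  simpa [PySem.List.max?] using pv_foldl_max_map h key xs none

-- the two selection procedures agree on every group list
lemma pv_pick_eq (g : List String) : pvMostCommon1 (PySem.Dict.counter g) = pvPickCasing g := by
  unfold pvMostCommon1 pvPickCasing
  rw [PySem.Dict.items_counter, PySem.List.dedup_eq_ofList,
    pv_max?_map (fun k => (k, (List.count k g : Int))) (fun p => p.2) (PySem.Set.ofList g)]
  cases PySem.List.max? (PySem.Set.ofList g) (fun x => (g.count x : Int)) with
  | none => rfl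
  | some m => rfl

lemma pv_step_rel (gB : PySem.Dict String (List String))
    (gA : PySem.Dict String (PySem.Dict String Int))
    (hI : gA.items = gB.items.map pvF) (v : String) :
    (pvStepA gA v).items = (pvGStep gB v).items.map pvF := by
  have hcontains : ∀ k, gA.contains k = gB.contains k := by
    intro k
    simp only [PySem.Dict.contains, hI, List.any_map]
    rfl
  have hget? : ∀ k, gA.get? k = (gB.get? k).map PySem.Dict.counter := by
    intro k
    simp only [PySem.Dict.get?, hI, List.find?_map]
    have : ((fun p : String × PySem.Dict String Int => p.1 == k) ∘ pvF)
        = (fun p : String × List String => p.1 == k) := by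
      funext p; rfl
    rw [this]
    cases List.find? (fun p => p.1 == k) gB.items with
    | none => rfl
    | some p => rfl
  have hgetD : ∀ k, gA.getD k PySem.Dict.empty = PySem.Dict.counter (gB.getD k []) := by
    intro k
    simp only [PySem.Dict.getD, hget?]
    cases gB.get? k with
    | none => rfl
    | some l => rfl
  show (gA.insert (PySem.Str.lower v)
        ((gA.getD (PySem.Str.lower v) PySem.Dict.empty).modify v 0 (· + 1))).items
      = (gB.insert (PySem.Str.lower v) (gB.getD (PySem.Str.lower v) [] ++ [v])).items.map pvF
  set k := PySem.Str.lower v with hk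
  have hval : (gA.getD k PySem.Dict.empty).modify v 0 (· + 1)
      = PySem.Dict.counter (gB.getD k [] ++ [v]) := by
    rw [hgetD, PySem.Dict.counter_append_singleton]
  rw [hval]
  simp only [PySem.Dict.insert, hcontains]
  by_cases hc : gB.contains k = true
  · simp only [hc, if_true, hI, List.map_map]
    congr 1
    funext p
    by_cases hp : p.1 = k <;> simp [pvF, hp]
  · simp [hc, hI, pvF]

lemma pv_loop_rel : ∀ (values : List String) (gB : PySem.Dict String (List String))
    (gA : PySem.Dict String (PySem.Dict String Int)),
    gA.items = gB.items.map pvF →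
    (values.foldl pvStepA gA).items = (values.foldl pvGStep gB).items.map pvF := by
  intro values
  induction values with
  | nil => intro gB gA h; simpa using h
  | cons v vs ih =>
    intro gB gA h
    simpa using ih (pvGStep gB v) (pvStepA gA v) (pv_step_rel gB gA h v)

-- characterization of the ghost grouping fold
lemma pv_gitems (values : List String) :
    (values.foldl pvGStep PySem.Dict.empty).items
      = (PySem.List.dedup (values.map PySem.Str.lower)).map
          (fun k => (k, values.filter (fun v => PySem.Str.lower v == k))) := by
  have hfold : values.foldl pvGStep PySem.Dict.empty
      = List.foldl (fun d x => d.modify (PySem.Str.lower x) []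
          ((fun (_ : PySem.Dict String (List String)) (x : String) (g : List String) => g ++ [x]) d x))
        PySem.Dict.empty values := rfl
  have hkeys : (values.foldl pvGStep PySem.Dict.empty).keys
      = PySem.List.dedup (values.map PySem.Str.lower) := by
    rw [hfold, PySem.Dict.keys_foldl_modify_key]
    rw [show (PySem.Dict.empty : PySem.Dict String (List String)).keys = [] from rfl,
      PySem.Set.update_nil_left]
    rfl
  have hnodup : (values.foldl pvGStep PySem.Dict.empty).keys.Nodup := by
    rw [hfold]
    exact PySem.Dict.nodup_keys_foldl_modify_key _ _ _ _ _
      (by simp [show (PySem.Dict.empty : PySem.Dict String (List String)).keys = [] from rfl])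
  have hgetD : ∀ c, (values.foldl pvGStep PySem.Dict.empty).getD c []
      = values.filter (fun v => PySem.Str.lower v == c) := by
    intro c
    have hmapfold : values.foldl pvGStep PySem.Dict.empty
        = (values.map (fun v => (PySem.Str.lower v, v))).foldl
            (fun d p => d.modify p.1 [] (· ++ [p.2])) PySem.Dict.empty := by
      rw [List.foldl_map]
      rfl
    rw [hmapfold, PySem.Dict.getD_foldl_modify_append]
    rw [show (PySem.Dict.empty : PySem.Dict String (List String)).getD c [] = [] from rfl]
    rw [List.filter_map]
    simp [Function.comp_def]
  rw [PySem.Dict.items_eq_map_keys _ hnodup [], hkeys]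
  exact List.map_congr_left (fun k _ => by rw [hgetD])

-- A's output, characterized
lemma pv_A_spec (values : List String) :
    canonicalise values
      = (PySem.List.dedup (values.map PySem.Str.lower)).map
          (fun k => (k, pvPickCasing (values.filter (fun v => PySem.Str.lower v == k)))) := by
  show ((values.foldl pvStepA PySem.Dict.empty).items).map (fun p => (p.1, pvMostCommon1 p.2))
      = _
  rw [pv_loop_rel values PySem.Dict.empty PySem.Dict.empty rfl, List.map_map, pv_gitems,
    List.map_map]
  refine List.map_congr_left (fun k _ => ?_)
  simp [pvF, pv_pick_eq]

-- dedup peels its head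
lemma pv_dedup_cons {α : Type} [BEq α] [LawfulBEq α] (x : α) (l : List α) :
    PySem.List.dedup (x :: l) = x :: (PySem.List.dedup l).filter (fun y => !(x == y)) := by
  show PySem.Set.ofList (x :: l) = _
  rw [show PySem.Set.ofList (x :: l) = PySem.Set.update (PySem.Set.add PySem.Set.empty x) l from rfl]
  rw [show PySem.Set.add PySem.Set.empty x = [x] from rfl]
  rw [PySem.Set.update_eq_append_filter]
  rw [show PySem.List.dedup l = PySem.Set.ofList l from rfl]
  simp only [List.singleton_append, List.cons.injEq, true_and]
  refine List.filter_congr (fun y _ => ?_)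
  simp [PySem.Set.contains_eq_listContains, BEq.comm]

-- dedup commutes with a filter
lemma pv_dedup_filter {α : Type} [BEq α] [LawfulBEq α] (p : α → Bool) (l : List α) :
    PySem.List.dedup (l.filter p) = (PySem.List.dedup l).filter p := by
  induction l with
  | nil => rfl
  | cons x t ih =>
    by_cases hp : p x = true
    · rw [List.filter_cons_of_pos hp, pv_dedup_cons, pv_dedup_cons, ih,
        List.filter_cons_of_pos hp, List.filter_filter, List.filter_filter]
      congr 1
      exact List.filter_congr (fun y _ => Bool.and_comm _ _)
    · rw [List.filter_cons_of_neg hp, ih, pv_dedup_cons,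
        List.filter_cons_of_neg hp, List.filter_filter]
      refine List.filter_congr (fun y _ => ?_)
      by_cases hxy : (x == y) = true
      · have : y = x := (eq_of_beq hxy).symm
        subst this
        simp [Bool.not_eq_true] at hp
        simp [hp]
      · simp [hxy]

lemma pv_idx_cons_ne (b x : String) (t : List String) (h : b ≠ x) :
    List.idxOf? b (x::t) = (List.idxOf? b t).map (·+1) := by
  simp [List.idxOf?_cons, beq_iff_eq, Ne.symm h]

-- distinct casings are in strictly increasing first-occurrence order
lemma pv_idx_pairwise (g : List String) :
    (PySem.List.dedup g).Pairwise (fun a b =>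
      (((PySem.List.index? g a).getD 0 : Nat) : Int) < (((PySem.List.index? g b).getD 0 : Nat) : Int)) := by
  induction g with
  | nil => exact List.Pairwise.nil
  | cons x t ih =>
    rw [pv_dedup_cons]
    constructor
    · intro b hb
      have hbt : b ∈ t := (PySem.List.mem_dedup _ _).1 (List.mem_of_mem_filter hb)
      have hne : b ≠ x := by
        have := List.of_mem_filter hb
        simp only [Bool.not_eq_eq_eq_not, Bool.not_true, beq_eq_false_iff_ne] at this
        exact fun he => this he.symm
      obtain ⟨i, hi⟩ := Option.isSome_iff_exists.mp (List.isSome_idxOf?.mpr hbt)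
      show (((List.idxOf? x (x::t)).getD 0 : Nat) : Int) < (((List.idxOf? b (x::t)).getD 0 : Nat) : Int)
      rw [pv_idx_cons_ne b x t hne, hi]
      simp [List.idxOf?_cons]
    · have hf := List.Pairwise.filter (fun y => !(x == y)) ih
      refine hf.imp_of_mem ?_
      intro a b ha hb hab
      have hna : a ≠ x := by
        have := List.of_mem_filter ha
        simp only [Bool.not_eq_eq_eq_not, Bool.not_true, beq_eq_false_iff_ne] at this
        exact fun he => this he.symm
      have hnb : b ≠ x := by
        have := List.of_mem_filter hb
        simp only [Bool.not_eq_eq_eq_not, Bool.not_true, beq_eq_false_iff_ne] at this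
        exact fun he => this he.symm
      have hat : a ∈ t := (PySem.List.mem_dedup _ _).1 (List.mem_of_mem_filter ha)
      have hbt : b ∈ t := (PySem.List.mem_dedup _ _).1 (List.mem_of_mem_filter hb)
      obtain ⟨i, hi⟩ := Option.isSome_iff_exists.mp (List.isSome_idxOf?.mpr hat)
      obtain ⟨j, hj⟩ := Option.isSome_iff_exists.mp (List.isSome_idxOf?.mpr hbt)
      show (((List.idxOf? a (x::t)).getD 0 : Nat) : Int) < (((List.idxOf? b (x::t)).getD 0 : Nat) : Int)
      rw [pv_idx_cons_ne a x t hna, pv_idx_cons_ne b x t hnb, hi, hj]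
      have hab' : (i : Int) < (j : Int) := by
        simpa [PySem.List.index?, hi, hj] using hab
      simp
      omega

lemma pv_min2_aux {α : Type} (c k2 : α → Int) :
    ∀ (t : List α), t.Pairwise (fun a b => k2 a < k2 b) →
    ∀ (m : α), (∀ y ∈ t, k2 m < k2 y) →
    List.foldl (fun acc x => match acc with
      | none => some x
      | some m => if (decide ((fun v => -(c v)) x < (fun v => -(c v)) m)
            || !decide ((fun v => -(c v)) m < (fun v => -(c v)) x) && decide (k2 x < k2 m)) = true
          then some x else some m) (some m) t
    = List.foldl (fun acc x => match acc with
      | none => some x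
      | some m => if c m < c x then some x else some m) (some m) t := by
  intro t
  induction t with
  | nil => intro _ m _; rfl
  | cons x xs ih =>
    intro hp m hm
    have hk2 : k2 m < k2 x := hm x (List.mem_cons_self)
    have hnot : decide (k2 x < k2 m) = false := by simp; omega
    have hcond : (decide (-(c x) < -(c m)) || !decide (-(c m) < -(c x)) && decide (k2 x < k2 m))
        = decide (c m < c x) := by
      rw [hnot]
      simp
    simp only [List.foldl_cons, hcond]
    by_cases hc : c m < c x
    · simp only [hc, decide_true, if_true]
      exact ih hp.of_cons x (fun y hy => (List.pairwise_cons.mp hp).1 y hy)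
    · simp only [hc, decide_false, if_false]
      exact ih hp.of_cons m (fun y hy => hm y (List.mem_cons_of_mem _ hy))

-- min over (-count, firstIndex) = first count-maximal, along increasing first indices
lemma pv_min2_eq_max {α : Type} (l : List α) (c k2 : α → Int)
    (hp : l.Pairwise (fun a b => k2 a < k2 b)) :
    PySem.List.min2? l (fun v => -(c v)) k2 = PySem.List.max? l c := by
  cases l with
  | nil => rfl
  | cons x t =>
    show List.foldl _ (some x) t = List.foldl _ (some x) t
    exact pv_min2_aux c k2 t hp.of_cons x (fun y hy => (List.pairwise_cons.mp hp).1 y hy)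

lemma pv_winner_eq (g : List String) : pvWinner g = pvPickCasing g := by
  unfold pvWinner pvPickCasing
  rw [pv_min2_eq_max _ _ _ (pv_idx_pairwise g)]

-- the peel loop accumulates exactly the grouped spec
set_option maxHeartbeats 1000000 in
lemma pv_peel_items : ∀ (n : Nat) (values : List String), values.length ≤ n →
    ∀ (out : PySem.Dict String String),
      (∀ k, k ∈ values.map PySem.Str.lower → out.contains k = false) →
      (pvPeel out values).items
        = out.items ++ (PySem.List.dedup (values.map PySem.Str.lower)).map
            (fun k => (k, pvWinner (values.filter (fun v => PySem.Str.lower v == k)))) := by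
  intro n
  induction n with
  | zero =>
    intro values hlen out _
    have : values = [] := List.eq_nil_of_length_eq_zero (Nat.le_zero.mp hlen)
    subst this
    simp [pvPeel, PySem.List.dedup]
  | succ n ih =>
    intro values hlen out hfresh
    cases values with
    | nil => simp [pvPeel, PySem.List.dedup]
    | cons v vs =>
      have hq : (PySem.Str.lower v != PySem.Str.lower v) = false := by simp
      have hrem : (v :: vs).filter (fun w => PySem.Str.lower w != PySem.Str.lower v)
          = vs.filter (fun w => PySem.Str.lower w != PySem.Str.lower v) := by
        simp only [List.filter_cons, hq, Bool.false_eq_true, if_false]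
      have hkeyfresh : out.contains (PySem.Str.lower v) = false := hfresh _ (by simp)
      have hlen' : ((v :: vs).filter (fun w => PySem.Str.lower w != PySem.Str.lower v)).length ≤ n := by
        rw [hrem]
        exact Nat.le_trans (List.length_filter_le _ _) (Nat.le_of_succ_le_succ hlen)
      have hfresh' : ∀ k, k ∈ ((v :: vs).filter (fun w => PySem.Str.lower w != PySem.Str.lower v)).map PySem.Str.lower →
          (out.insert (PySem.Str.lower v)
            (pvWinner ((v :: vs).filter (fun w => PySem.Str.lower w == PySem.Str.lower v)))).contains k = false := by
        intro k hk
        obtain ⟨u, hu, huk⟩ := List.mem_map.mp hk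
        obtain ⟨humem, hune⟩ := List.mem_filter.mp hu
        rw [PySem.Dict.contains_insert]
        have h1 : (k == PySem.Str.lower v) = false := by
          rw [← huk]; simpa using hune
        have h2 : out.contains k = false := hfresh _ (List.mem_map.mpr ⟨u, humem, huk⟩)
        rw [h1, h2]
        rfl
      rw [pvPeel]
      rw [ih _ hlen' _ hfresh']
      rw [PySem.Dict.items_insert_of_not_contains out _ hkeyfresh]
      rw [List.append_assoc]
      congr 1
      rw [show (v :: vs).map PySem.Str.lower = PySem.Str.lower v :: vs.map PySem.Str.lower from rfl,
        pv_dedup_cons]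
      simp only [List.map_cons, List.singleton_append]
      congr 1
      have hremmap : ((v :: vs).filter (fun w => PySem.Str.lower w != PySem.Str.lower v)).map PySem.Str.lower
          = (vs.map PySem.Str.lower).filter (fun y => y != PySem.Str.lower v) := by
        rw [hrem]
        simpa [Function.comp_def] using
          (List.filter_map (f := PySem.Str.lower) (p := fun y => y != PySem.Str.lower v) (l := vs)).symm
      rw [hremmap, pv_dedup_filter]
      have hfiltereq : (PySem.List.dedup (vs.map PySem.Str.lower)).filter (fun y => !(PySem.Str.lower v == y))
          = (PySem.List.dedup (vs.map PySem.Str.lower)).filter (fun y => y != PySem.Str.lower v) := by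
        refine List.filter_congr (fun y _ => ?_)
        simp [bne, BEq.comm]
      rw [hfiltereq]
      refine List.map_congr_left (fun k hk => ?_)
      have hkne' : k ≠ PySem.Str.lower v := by
        have := (List.mem_filter.mp hk).2
        simpa using this
      have hfe : ((v :: vs).filter (fun w => PySem.Str.lower w != PySem.Str.lower v)).filter
            (fun w => PySem.Str.lower w == k)
          = (v :: vs).filter (fun w => PySem.Str.lower w == k) := by
        rw [List.filter_filter]
        refine List.filter_congr (fun u _ => ?_)
        by_cases hu : (PySem.Str.lower u == k) = true
        · have heq : PySem.Str.lower u = k := eq_of_beq hu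
          have hne : (PySem.Str.lower u != PySem.Str.lower v) = true := by
            simp [heq, bne, hkne']
          simp [hu, hne]
        · simp [hu]
      rw [hfe]

-- ===== VERDICT (by name: the statement is the Claim_ definition above) =====
theorem canonicalise_spec : Claim_equal_canonicalise := by
  intro values _
  show canonicalise values = canonicalise_alt values
  rw [pv_A_spec]
  unfold canonicalise_alt
  rw [pv_peel_items values.length values le_rfl PySem.Dict.empty
        (fun k _ => PySem.Dict.contains_empty k)]
  have hemp : (PySem.Dict.empty : PySem.Dict String String).items = [] := rfl
  rw [hemp, List.nil_append]
  exact List.map_congr_left (fun k _ => by rw [pv_winner_eq])
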